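-- pv_equiv track=rewrite | github.com/gabe91/IS211_Assignment13 | recursion.py | compareTos
-- ===== SOURCE A (Python) =====
-- def compareTos(s1, s2):
--
--     len_1 = len(s1)
--     len_2 = len(s2)
--
--     if len_1 < len_2:
--         length = len_2
--     else:
--         length = len_2
--
--     if length == 0 & len_1 > 0:
--         return -1
--     elif length == 0 & len_2 > 0:
--         return 1
--
--     for i in range(length):
--
--         a1 = ord(s1[i])
--         a2 = ord(s2[i])
--
--         if a1 == a2:
--             return compareTos(s1[1:len_1], s2[1:len_2])
--         else:
--             return a1 - a2
--     return 0
-- ===== SOURCE B (Python) =====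
-- def compareTos(s1, s2):
--     # Single linear scan over the paired characters: return the ord difference
--     # at the first mismatch, 0 if s2 is exhausted without a mismatch.
--     for c1, c2 in zip(s1, s2):
--         if c1 != c2:
--             return ord(c1) - ord(c2)
--     return 0
-- ===== Notes on version B (the rewrite author's own statement) =====
-- stated objective: faster
-- what changed: Replaces A's recursion that re-slices both whole strings at every matching character with a single iterative zip scan that returns the ord difference at the first mismatch.
import Mathlib
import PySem

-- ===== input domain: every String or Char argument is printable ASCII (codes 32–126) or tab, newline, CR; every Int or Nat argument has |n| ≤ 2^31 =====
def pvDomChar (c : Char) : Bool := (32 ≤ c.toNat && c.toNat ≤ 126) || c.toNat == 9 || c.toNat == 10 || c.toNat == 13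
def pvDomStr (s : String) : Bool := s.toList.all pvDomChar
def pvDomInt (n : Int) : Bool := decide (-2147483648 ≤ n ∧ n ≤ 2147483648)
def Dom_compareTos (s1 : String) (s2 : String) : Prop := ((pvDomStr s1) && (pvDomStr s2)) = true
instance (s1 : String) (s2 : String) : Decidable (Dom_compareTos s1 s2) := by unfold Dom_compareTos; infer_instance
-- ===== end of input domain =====

-- B replaces A's recursion (which re-slices both strings at every matching character)
-- by one linear zip scan; equivalence is claimed on Pre_, i.e. wherever A returns.

-- ===== PORT A =====
-- s[1:len] = tail (needed by the port's recursive call and its termination proof)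
theorem pvSliceTail {α : Type} (l : List α) :
    PySem.List.slice l (some 1) (some (l.length : Int)) = l.tail := by
  have h := PySem.List.slice_natCast (xs := l) (a := 1) (b := l.length)
  simp only [Nat.cast_one] at h
  rw [h, List.drop_one]
  exact List.take_of_length_le (by simp)

-- literal transliteration of A: `length` is len_2 in both branches of the first if;
-- the two `length == 0 & len_x > 0` tests are Python's chained comparison
-- `length == (0 & len_x) and (0 & len_x) > 0`; the for-loop returns in its first
-- iteration, so it is the `length = 0` test plus the body at i = 0; pyGet? = none
-- (IndexError) is mapped to 0, excluded by Pre_.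
def compareTosAux (l1 l2 : List Char) : Int :=
  let len1 := l1.length
  let len2 := l2.length
  let length := if len1 < len2 then len2 else len2
  if length = (0 &&& len1) ∧ (0 &&& len1) > 0 then -1
  else if length = (0 &&& len2) ∧ (0 &&& len2) > 0 then 1
  else if h : length = 0 then 0
  else
    match PySem.List.pyGet? l1 0, PySem.List.pyGet? l2 0 with
    | some c1, some c2 =>
        if c1.toNat = c2.toNat then
          compareTosAux (PySem.List.slice l1 (some 1) (some (len1 : Int)))
                        (PySem.List.slice l2 (some 1) (some (len2 : Int)))
        else (c1.toNat : Int) - (c2.toNat : Int)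
    | _, _ => 0
termination_by l2.length
decreasing_by
  rw [pvSliceTail]
  have h2 : ¬ (if l1.length < l2.length then l2.length else l2.length) = 0 := h
  rw [ite_self] at h2
  rcases l2 with _ | ⟨c, t⟩
  · exact absurd rfl h2
  · simp

def compareTos (s1 : String) (s2 : String) : Int := compareTosAux s1.toList s2.toList

-- ===== PORT B =====
def compareTosAltLoop : List (Char × Char) → Int
  | [] => 0
  | (c1, c2) :: rest => if c1 ≠ c2 then (c1.toNat : Int) - (c2.toNat : Int) else compareTosAltLoop rest

def compareTos_alt (s1 : String) (s2 : String) : Int :=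
  compareTosAltLoop (s1.toList.zip s2.toList)

-- ===== PRECONDITION & SPEC =====
-- Pre_ excludes exactly the inputs where A raises IndexError: s1 a proper prefix of s2.
def Pre_compareTos (s1 : String) (s2 : String) : Prop :=
  ¬ (s1.toList <+: s2.toList ∧ s1.toList.length < s2.toList.length)
instance (s1 : String) (s2 : String) : Decidable (Pre_compareTos s1 s2) := by
  unfold Pre_compareTos; infer_instance
def pvWitness_compareTos : String × String := ("ab", "ac")

def Spec_compareTos (s1 : String) (s2 : String) (out : Int) : Prop := out = compareTos_alt s1 s2
instance (s1 : String) (s2 : String) (out : Int) : Decidable (Spec_compareTos s1 s2 out) := by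
  unfold Spec_compareTos; infer_instance

-- ===== CLAIM (what is proved, stated in full; the proofs are below) =====
def Claim_equal_compareTos : Prop := ∀ (s1 : String) (s2 : String), Dom_compareTos s1 s2 → Pre_compareTos s1 s2 → Spec_compareTos s1 s2 (compareTos s1 s2)

-- ===== LEMMAS AND PROOFS =====
theorem pvSliceTailCons (c : Char) (t : List Char) :
    PySem.List.slice (c :: t) (some 1) (some ((t.length : Int) + 1)) = t := by
  simpa using pvSliceTail (c :: t)

theorem pvCharToNatInj {c1 c2 : Char} (h : c1.toNat = c2.toNat) : c1 = c2 :=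
  Char.ext (UInt32.toNat_inj.mp h)

theorem pvAuxEq (l2 l1 : List Char) (h : ¬ (l1 <+: l2 ∧ l1.length < l2.length)) :
    compareTosAux l1 l2 = compareTosAltLoop (l1.zip l2) := by
  induction l2 generalizing l1 with
  | nil =>
      rw [compareTosAux]
      simp [compareTosAltLoop]
  | cons c2 t2 ih =>
      rcases l1 with _ | ⟨c1, t1⟩
      · exact absurd ⟨List.nil_prefix, by simp⟩ h
      · rw [compareTosAux]
        simp only [ite_self, Nat.zero_and, gt_iff_lt, lt_irrefl, and_false, if_false,
          List.length_cons]
        simp only [PySem.List.pyGet?, PySem.List.pyIdx?]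
        norm_num [pvSliceTailCons]
        by_cases hc : c1.toNat = c2.toNat
        · have hcc : c1 = c2 := pvCharToNatInj hc
          have h' : ¬ (t1 <+: t2 ∧ t1.length < t2.length) := by
            intro ⟨hp, hl⟩
            exact h ⟨by rw [hcc]; exact List.cons_prefix_cons.mpr ⟨rfl, hp⟩, by simpa using hl⟩
          rw [if_pos hc, ih t1 h']
          simp [compareTosAltLoop, hcc]
        · rw [if_neg hc]
          have hne : c1 ≠ c2 := fun e => hc (congrArg Char.toNat e)
          simp [compareTosAltLoop, hne]

-- ===== VERDICT (by name: the statement is the Claim_ definition above) =====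
theorem compareTos_spec : Claim_equal_compareTos := by
  intro s1 s2 _ hpre
  unfold Spec_compareTos compareTos compareTos_alt
  exact pvAuxEq s2.toList s1.toList hpre
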